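-- pv_equiv track=rewrite | github.com/kingsonc/CUED-MEng-Project-End-to-End-iPad-CFD | server/mesh.py | vertex_indices
-- ===== SOURCE A (Python) =====
-- from typing import List
--
-- def vertex_indices(M: int, N: int) -> List[int]:
--     def get_index(i: int, j: int) -> int:
--         return i * N + j
--
--     indices: List[int] = []
--
--     """
--     0---3         0---3           3
--     |   |  =>     |  /   and    / |
--     |   |         | /          /  |
--     1---2         1           1---2
--
--     """
--
--     for i in range(M - 1):
--         for j in range(N - 1):
--             indices.extend(
--                 [
--                     get_index(i, j),  # 0
--                     get_index(i + 1, j),  # 1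
--                     get_index(i, j + 1),  # 3
--                     get_index(i, j + 1),  # 3
--                     get_index(i + 1, j),  # 1
--                     get_index(i + 1, j + 1),  # 2
--                 ],
--             )
--
--     return indices
-- ===== SOURCE B (Python) =====
-- from typing import List
--
-- def vertex_indices(M: int, N: int) -> List[int]:
--     # Build the six-index pattern of row 0 once, then shift it by i*N per row.
--     if M <= 1:
--         return []
--     template: List[int] = []
--     for j in range(N - 1):
--         template.extend([j, N + j, j + 1, j + 1, N + j, N + j + 1])
--     out: List[int] = []
--     for i in range(M - 1):
--         out.extend([x + i * N for x in template])
--     return out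
-- ===== Notes on version B (the rewrite author's own statement) =====
-- stated objective: alternative
-- what changed: B precomputes the six-index template of a single row once and then emits each row by adding the offset i*N to the template, instead of recomputing i*N+j for every vertex of every cell.
import Mathlib
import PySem

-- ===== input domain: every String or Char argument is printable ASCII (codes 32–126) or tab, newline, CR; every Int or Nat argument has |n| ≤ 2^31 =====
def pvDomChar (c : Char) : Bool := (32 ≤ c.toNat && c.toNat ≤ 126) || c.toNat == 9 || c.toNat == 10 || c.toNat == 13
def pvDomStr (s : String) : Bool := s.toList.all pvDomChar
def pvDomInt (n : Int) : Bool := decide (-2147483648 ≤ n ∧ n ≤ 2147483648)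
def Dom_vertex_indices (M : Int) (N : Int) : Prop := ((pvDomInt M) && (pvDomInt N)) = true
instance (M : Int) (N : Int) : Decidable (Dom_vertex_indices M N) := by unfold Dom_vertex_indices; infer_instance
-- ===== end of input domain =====

-- B builds the one-row template once and shifts it per row; same cost, different decomposition.

-- ===== PORT A =====
def vertex_indices (M : Int) (N : Int) : List Int :=
  let get_index : Int → Int → Int := fun i j => i * N + j
  (PySem.List.pyRange 0 (M - 1) 1).foldl (fun indices i =>
    (PySem.List.pyRange 0 (N - 1) 1).foldl (fun indices j =>
      indices ++ [get_index i j, get_index (i+1) j, get_index i (j+1),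
                  get_index i (j+1), get_index (i+1) j, get_index (i+1) (j+1)]) indices) []

-- ===== PORT B =====
def vertex_indices_alt (M : Int) (N : Int) : List Int :=
  if M ≤ 1 then [] else
  let template : List Int :=
    (PySem.List.pyRange 0 (N - 1) 1).foldl
      (fun t j => t ++ [j, N + j, j + 1, j + 1, N + j, N + j + 1]) []
  (PySem.List.pyRange 0 (M - 1) 1).foldl
    (fun out i => out ++ template.map (fun x => x + i * N)) []

-- ===== PRECONDITION & SPEC =====
def Spec_vertex_indices (M : Int) (N : Int) (out : List Int) : Prop := out = vertex_indices_alt M N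
instance (M : Int) (N : Int) (out : List Int) : Decidable (Spec_vertex_indices M N out) := by unfold Spec_vertex_indices; infer_instance

-- ===== CLAIM (what is proved, stated in full; the proofs are below) =====
def Claim_equal_vertex_indices : Prop := ∀ (M : Int) (N : Int), Dom_vertex_indices M N → Spec_vertex_indices M N (vertex_indices M N)

-- ===== LEMMAS AND PROOFS =====
theorem pv_row_eq (N i : Int) :
    (PySem.List.pyRange 0 (N - 1) 1).flatMap
      (fun j => [i * N + j, (i+1) * N + j, i * N + (j+1),
                 i * N + (j+1), (i+1) * N + j, (i+1) * N + (j+1)])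
    = ((PySem.List.pyRange 0 (N - 1) 1).flatMap
        (fun j => [j, N + j, j + 1, j + 1, N + j, N + j + 1])).map (fun x => x + i * N) := by
  rw [List.map_flatMap]
  apply List.flatMap_congr
  intro j _
  simp [List.map]
  refine ⟨by ring, by ring, by ring, by ring, by ring⟩

theorem vertex_indices_eq_alt (M N : Int) : vertex_indices M N = vertex_indices_alt M N := by
  unfold vertex_indices vertex_indices_alt
  by_cases hM : M ≤ 1
  · simp [hM, PySem.List.pyRange_one_eq_nil (by omega : M - 1 ≤ 0)]
  · simp only [if_neg hM, PySem.List.foldl_append_eq_flatMap, List.nil_append]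
    apply List.flatMap_congr
    intro i _
    exact pv_row_eq N i

-- ===== VERDICT (by name: the statement is the Claim_ definition above) =====
theorem vertex_indices_spec : Claim_equal_vertex_indices := by
  intro M N _
  exact vertex_indices_eq_alt M N
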